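-- pv_equiv track=rewrite | github.com/NemanjaZivanovic/Projekat-iz-RI | MSC.py | druga_fja
-- ===== SOURCE A (Python) =====
-- def calculate_fitness(graf):
--   count_global = -1
--   jedinka_global = -1
--   for jedinka in graf:
--     count = 0
--     jedina_copy = jedinka
--     while (jedinka):
--       jedinka = jedinka & (jedinka-1)
--       count+= 1
--     if(count_global < count):
--       count_global = count
--       jedinka_global = jedina_copy
--   return jedinka_global
--
-- def druga_fja(graf):
--   count = 0
--   unique = -1
--   vrednost = calculate_fitness(graf)
--   k = 0
--   while( (1<<k) <= vrednost):
--     k+=1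
--
--   for i in range(k):
--     for j in graf:
--       if 1 << (k-i-1) & j:
--         if count==0:
--           count += 1
--           unique = j
--         else:
--           count = 0
--           unique = -1
--           break
--     if(count==1):
--       return unique
--   return -1
-- ===== SOURCE B (Python) =====
-- def calculate_fitness(graf):
--     count_global = -1
--     jedinka_global = -1
--     for jedinka in graf:
--         count = 0
--         jedina_copy = jedinka
--         while jedinka:
--             jedinka = jedinka & (jedinka - 1)
--             count += 1
--         if count_global < count:
--             count_global = count
--             jedinka_global = jedina_copy
--     return jedinka_global
--
-- def druga_fja(graf):
--     vrednost = calculate_fitness(graf)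
--     k = 0
--     while (1 << k) <= vrednost:
--         k += 1
--     counts = [0] * k
--     reps = [-1] * k
--     for j in graf:
--         for p in range(k):
--             if (j >> p) & 1:
--                 counts[p] += 1
--                 reps[p] = j
--     for p in range(k - 1, -1, -1):
--         if counts[p] == 1:
--             return reps[p]
--     return -1
-- ===== Notes on version B (the rewrite author's own statement) =====
-- stated objective: alternative
-- what changed: B makes one accumulation pass over graf building per-bit-position count and last-representative tables and then scans bit positions top-down, instead of A's rescan of the whole graph for every bit position with break-based uniqueness detection; fitness/k derivation is kept as in A.
import Mathlib
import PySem

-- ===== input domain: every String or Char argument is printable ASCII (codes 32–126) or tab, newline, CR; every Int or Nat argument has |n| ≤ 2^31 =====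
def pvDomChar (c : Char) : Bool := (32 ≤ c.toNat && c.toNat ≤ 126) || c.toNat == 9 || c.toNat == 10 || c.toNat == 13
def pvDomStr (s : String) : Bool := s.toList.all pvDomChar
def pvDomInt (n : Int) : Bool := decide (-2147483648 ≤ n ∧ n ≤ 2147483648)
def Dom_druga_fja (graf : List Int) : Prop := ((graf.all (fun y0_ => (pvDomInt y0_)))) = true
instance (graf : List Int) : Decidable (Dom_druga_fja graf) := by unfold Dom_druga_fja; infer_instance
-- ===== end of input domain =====

-- B replaces A's per-bit full rescans (with break-based uniqueness detection) by one accumulation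
-- pass building per-bit count/representative tables, then a scan over bit positions (objective: alternative).

-- ===== PORT A =====
-- shared helper: the Kernighan popcount while-loop of calculate_fitness (fuel = |j|+1 suffices for j ≥ 0)
def pvPopLoop : Nat → Int → Int → Int
  | 0, _, count => count
  | fuel+1, j, count =>
      if j ≠ 0 then pvPopLoop fuel (PySem.Int.band j (j - 1)) (count + 1) else count

-- shared helper: calculate_fitness (same module-level helper, used verbatim by both Pythons)
def pvCalcFitness (graf : List Int) : Int :=
  (graf.foldl
    (fun (st : Int × Int) jedinka =>
      let count := pvPopLoop (jedinka.natAbs + 1) jedinka 0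
      if st.1 < count then (count, jedinka) else st)
    (-1, -1)).2

-- shared helper: the while-loop deriving k from vrednost (fuel = |v|+1 suffices)
def pvKLoop : Nat → Int → Nat → Nat
  | 0, _, k => k
  | fuel+1, v, k => if ((1:Int) <<< k) ≤ v then pvKLoop fuel v (k + 1) else k

-- A's inner for-j loop (with its break); mask = 1 << (k-i-1); returns (count, unique)
def pvInnerA (mask : Int) : List Int → Int → Int → Int × Int
  | [], count, unique => (count, unique)
  | j :: rest, count, unique =>
      if PySem.Int.band mask j ≠ 0 then
        if count = 0 then pvInnerA mask rest (count + 1) j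
        else (0, -1)
      else pvInnerA mask rest count unique

-- A's outer for-i loop over range(k); argument m = number of iterations left, bit index k-i-1 = m-1
def pvOuterA (graf : List Int) : Nat → Int → Int → Int
  | 0, _count, _unique => -1
  | m+1, count, unique =>
      let r := pvInnerA ((1:Int) <<< m) graf count unique
      if r.1 = 1 then r.2 else pvOuterA graf m r.1 r.2

def druga_fja (graf : List Int) : Int :=
  let vrednost := pvCalcFitness graf
  let k := pvKLoop (vrednost.natAbs + 1) vrednost 0
  pvOuterA graf k 0 (-1)

-- ===== PORT B =====
-- B's per-element update of the two tables: for p in range(k), bump counts[p] / set reps[p]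
def pvStepB (k : Nat) (cr : List Int × List Int) (j : Int) : List Int × List Int :=
  (List.range k).foldl
    (fun cr (p : Nat) =>
      if PySem.Int.band (j >>> p) 1 ≠ 0 then (cr.1.set p (cr.1.getD p 0 + 1), cr.2.set p j)
      else cr) cr

-- B's final loop: for p in range(k-1, -1, -1)
def pvScanDown (counts reps : List Int) : Nat → Int
  | 0 => -1
  | p+1 => if counts.getD p 0 = 1 then reps.getD p (-1) else pvScanDown counts reps p

def druga_fja_alt (graf : List Int) : Int :=
  let vrednost := pvCalcFitness graf
  let k := pvKLoop (vrednost.natAbs + 1) vrednost 0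
  let cr := graf.foldl (pvStepB k) (List.replicate k 0, List.replicate k (-1))
  pvScanDown cr.1 cr.2 k

-- ===== PRECONDITION & SPEC =====
-- Pre_ excludes lists containing a negative element: there Python's calculate_fitness
-- while-loop never terminates (jedinka & (jedinka-1) never reaches 0), so A diverges.
def Pre_druga_fja (graf : List Int) : Prop := ∀ j ∈ graf, 0 ≤ j
instance (graf : List Int) : Decidable (Pre_druga_fja graf) := by unfold Pre_druga_fja; infer_instance
def pvWitness_druga_fja : List Int := [3, 5]

def Spec_druga_fja (graf : List Int) (out : Int) : Prop := out = druga_fja_alt graf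
instance (graf : List Int) (out : Int) : Decidable (Spec_druga_fja graf out) := by unfold Spec_druga_fja; infer_instance

-- ===== CLAIM (what is proved, stated in full; the proofs are below) =====
def Claim_equal_druga_fja : Prop := ∀ (graf : List Int), Dom_druga_fja graf → Pre_druga_fja graf → Spec_druga_fja graf (druga_fja graf)

-- ===== LEMMAS AND PROOFS =====

-- B's bit test as the canonical predicate
def pvPb (p : Nat) (j : Int) : Bool := PySem.Int.band (j >>> p) 1 != 0

-- the per-bit count and representative B's tables should contain
def pvFc (l : List Int) (p : Nat) : Int := ((l.filter (pvPb p)).length : Int)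
def pvFr (l : List Int) (p : Nat) : Int := ((l.filter (pvPb p)).getLast?).getD (-1)

theorem pv_map_range_congr (k : Nat) (f g : Nat → Int) (h : ∀ p < k, f p = g p) :
    (List.range k).map f = (List.range k).map g := by
  apply List.map_congr_left
  intro p hp
  exact h p (List.mem_range.mp hp)

theorem pv_bit_equiv (j : Int) (p : Nat) (hj : 0 ≤ j) :
    (PySem.Int.band ((1:Int) <<< p) j ≠ 0) ↔ pvPb p j = true := by
  obtain ⟨n, rfl⟩ := Int.eq_ofNat_of_zero_le hj
  have h1 : ((1:Int) <<< p) = ((2^p : Nat) : Int) := by simp [Int.shiftLeft_eq]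
  have h2 : ((n:Int) >>> p) = ((n >>> p : Nat) : Int) := by
    simp [Int.shiftRight_eq_div_pow, Nat.shiftRight_eq_div_pow]
  rw [pvPb, h1, h2, show (1:Int) = ((1:Nat):Int) from rfl,
    PySem.Int.band_natCast, PySem.Int.band_natCast]
  have hA : (2^p &&& n = 0) ↔ ¬ n.testBit p := by
    rw [Nat.and_comm]; simp [Nat.and_two_pow, Nat.testBit]
  have hB : ((n >>> p) &&& 1 = 0) ↔ ¬ n.testBit p := by
    simp [Nat.testBit, Nat.and_one_is_mod]
  simp only [ne_eq, Int.natCast_eq_zero, bne_iff_ne]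
  rw [not_iff_not]
  exact hA.trans hB.symm

theorem pvInnerA_one (m : Int) (l : List Int) (u : Int) :
    pvInnerA m l 1 u =
      if l.filter (fun j => PySem.Int.band m j != 0) = [] then (1, u) else (0, -1) := by
  induction l generalizing u with
  | nil => simp [pvInnerA]
  | cons j rest ih =>
    by_cases h : PySem.Int.band m j ≠ 0
    · simp [pvInnerA, h, List.filter_cons]
    · simp only [ne_eq, not_not] at h
      simp [pvInnerA, h, List.filter_cons, ih]

theorem pvInnerA_zero (m : Int) (l : List Int) :
    pvInnerA m l 0 (-1) =
      match l.filter (fun j => PySem.Int.band m j != 0) with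
      | [x] => ((1 : Int), x)
      | _ => ((0 : Int), (-1 : Int)) := by
  induction l with
  | nil => simp [pvInnerA]
  | cons j rest ih =>
    by_cases h : PySem.Int.band m j ≠ 0
    · have hb : (PySem.Int.band m j != 0) = true := by simpa using h
      rw [pvInnerA, if_pos h, if_pos rfl, show (0:Int) + 1 = 1 by norm_num,
        pvInnerA_one, List.filter_cons, if_pos hb]
      by_cases he : rest.filter (fun j => PySem.Int.band m j != 0) = []
      · simp [he]
      · obtain ⟨y, ys, hy⟩ := List.exists_cons_of_ne_nil he
        simp [he, hy]
    · simp only [ne_eq, not_not] at h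
      simp [pvInnerA, h, List.filter_cons, ih]

-- getD on a map over range
theorem pv_getD_map_range (k m : Nat) (g : Nat → Int) (d : Int) (hm : m < k) :
    ((List.range k).map g).getD m d = g m := by
  simp [List.getD, List.getElem?_map, List.getElem?_range, hm]

-- set on a map over range is a pointwise update
theorem pv_set_map_range (k m : Nat) (g : Nat → Int) (v : Int) :
    ((List.range k).map g).set m v = (List.range k).map (fun p => if p = m then v else g p) := by
  apply List.ext_getElem
  · simp
  · intro i h1 h2
    simp only [List.getElem_set, List.getElem_map, List.getElem_range]
    by_cases h : m = i <;> simp [h, eq_comm]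

-- one pvStepB on tables-of-maps updates the maps pointwise
theorem pvStepB_maps (k : Nat) (j : Int) (fc fr : Nat → Int) :
    pvStepB k ((List.range k).map fc, (List.range k).map fr) j
      = ((List.range k).map (fun p => if pvPb p j then fc p + 1 else fc p),
         (List.range k).map (fun p => if pvPb p j then j else fr p)) := by
  suffices h : ∀ m ≤ k,
      (List.range m).foldl
        (fun cr (p : Nat) =>
          if PySem.Int.band (j >>> p) 1 ≠ 0 then (cr.1.set p (cr.1.getD p 0 + 1), cr.2.set p j)
          else cr)
        ((List.range k).map fc, (List.range k).map fr)
      = ((List.range k).map (fun p => if p < m ∧ pvPb p j then fc p + 1 else fc p),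
         (List.range k).map (fun p => if p < m ∧ pvPb p j then j else fr p)) by
    rw [pvStepB, h k le_rfl]
    simp only [Prod.mk.injEq]
    constructor <;>
    · apply pv_map_range_congr; intro p hp
      by_cases hb : pvPb p j <;> simp [hb, hp]
  intro m hm
  induction m with
  | zero =>
    simp only [List.range_zero, List.foldl_nil, Prod.mk.injEq]
    constructor <;>
    · apply pv_map_range_congr; intro p hp; simp
  | succ n ih =>
    rw [List.range_succ, List.foldl_append, ih (by omega), List.foldl_cons, List.foldl_nil]
    have hn : n < k := by omega
    by_cases hb : pvPb n j
    · have hb' : PySem.Int.band (j >>> n) 1 ≠ 0 := by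
        simpa [pvPb, bne_iff_ne] using hb
      simp only [hb', ne_eq, not_false_eq_true, if_true, if_pos]
      rw [pv_getD_map_range k n _ 0 hn, pv_set_map_range, pv_set_map_range]
      have hnn : ¬ (n < n ∧ pvPb n j = true) := by
        rintro ⟨h1, _⟩; omega
      rw [if_neg hnn]
      simp only [Prod.mk.injEq]
      constructor <;>
      · apply pv_map_range_congr; intro p hp
        by_cases hpn : p = n
        · subst hpn; simp [hb]
        · have heq : (p < n + 1 ∧ pvPb p j = true) ↔ (p < n ∧ pvPb p j = true) := by
            constructor <;> rintro ⟨h1, h2⟩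
            · refine ⟨?_, h2⟩; rcases Nat.lt_succ_iff_lt_or_eq.mp h1 with h | h
              · exact h
              · exact absurd h hpn
            · exact ⟨by omega, h2⟩
          rw [if_neg hpn]
          simp only [heq]
    · have hb' : ¬ PySem.Int.band (j >>> n) 1 ≠ 0 := by
        simpa [pvPb, bne_iff_ne] using hb
      rw [if_neg hb']
      simp only [Prod.mk.injEq]
      constructor <;>
      · apply pv_map_range_congr; intro p hp
        have heq : (p < n + 1 ∧ pvPb p j = true) ↔ (p < n ∧ pvPb p j = true) := by
          constructor <;> rintro ⟨h1, h2⟩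
          · refine ⟨?_, h2⟩
            rcases Nat.lt_succ_iff_lt_or_eq.mp h1 with h | h
            · exact h
            · subst h; exact absurd h2 hb
          · exact ⟨by omega, h2⟩
        simp only [heq]

-- B's whole table-building fold computes the per-bit counts and last representatives
theorem pv_tables (k : Nat) (l : List Int) :
    l.foldl (pvStepB k) (List.replicate k 0, List.replicate k (-1))
      = ((List.range k).map (pvFc l), (List.range k).map (pvFr l)) := by
  induction l using List.reverseRecOn with
  | nil =>
    have h0 : ∀ c : Int, List.replicate k c = (List.range k).map (fun _ => c) := by
      intro c
      apply List.ext_getElem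
      · simp
      · intro i h1 h2; simp
    rw [h0 0, h0 (-1)]
    simp only [List.foldl_nil, Prod.mk.injEq]
    constructor <;>
    · apply pv_map_range_congr; intro p hp; simp [pvFc, pvFr]
  | append_singleton l j ih =>
    rw [List.foldl_append, List.foldl_cons, List.foldl_nil, ih, pvStepB_maps]
    simp only [Prod.mk.injEq]
    constructor <;>
    · apply pv_map_range_congr; intro p hp
      by_cases hb : pvPb p j <;>
        simp [pvFc, pvFr, List.filter_append, List.filter_cons, hb, List.getLast?_append]

-- under Pre_, A's mask test selects exactly the elements B's shift test selects
theorem pv_filter_congr (graf : List Int) (h : ∀ j ∈ graf, 0 ≤ j) (p : Nat) :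
    graf.filter (fun j => PySem.Int.band ((1:Int) <<< p) j != 0) = graf.filter (pvPb p) := by
  apply List.filter_congr
  intro j hj
  have hbit := pv_bit_equiv j p (h j hj)
  by_cases hb : pvPb p j <;> simp_all [bne_iff_ne]

-- the two ports' main loops agree, given all elements are nonnegative
theorem pv_outer_scan (graf : List Int) (h : ∀ j ∈ graf, 0 ≤ j) (k : Nat) (m : Nat) (hm : m ≤ k) :
    pvOuterA graf m 0 (-1)
      = pvScanDown ((List.range k).map (pvFc graf)) ((List.range k).map (pvFr graf)) m := by
  induction m with
  | zero => simp [pvOuterA, pvScanDown]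
  | succ n ih =>
    have hn : n < k := by omega
    rw [pvOuterA, pvScanDown, pvInnerA_zero, pv_filter_congr graf h n,
      pv_getD_map_range k n _ 0 hn, pv_getD_map_range k n _ (-1) hn]
    rcases hf : graf.filter (pvPb n) with _ | ⟨x, _ | ⟨y, ys⟩⟩
    · simp [pvFc, pvFr, hf, ih (by omega)]
    · simp [pvFc, pvFr, hf]
    · have hne : pvFc graf n ≠ 1 := by
        simp only [pvFc, hf, List.length_cons]
        omega
      simp only [hne, if_false]
      have hz : ((0:Int), (-1:Int)).1 = (0:Int) := rfl
      simp [ih (by omega)]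

-- ===== VERDICT (by name: the statement is the Claim_ definition above) =====
theorem druga_fja_spec : Claim_equal_druga_fja := by
  intro graf _hdom hpre
  unfold Spec_druga_fja druga_fja druga_fja_alt
  dsimp only
  rw [pv_tables]
  exact pv_outer_scan graf hpre _ _ le_rfl
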